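-- pv_equiv track=rewrite | github.com/domysh/BoolExpression | BoolExpression.py | resultSelector
-- ===== SOURCE A (Python) =====
-- NULL_CHAR = '-' # have to be different from 0 and 1
--
-- def resultSelector(minTerms,results):
--     anTab = getAnalyseMat(minTerms,results)
--     res = []
--     checked = []
--     for x in range(len(anTab)):
--         if minTerms[x] not in checked:
--             repeted = len(minTerms)
--             minPos = None
--             for y in range(len(anTab[x])):
--                 if anTab[x][y]:
--                     this_repeat = getRepeted(anTab,minTerms,y,checked)
--                     if repeted > this_repeat:
--                         repeted = this_repeat
--                         minPos = y
--             repeted = len(minTerms)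
--             for term in minTerms:
--                 if equalsIngoreNull(results[minPos],term):
--                     checked.append(term)
--             res.append(results[minPos])
--     return res
--
-- def getRepeted(tab,minTerms,y,chk):
--     count = 0
--     for x in range(len(tab)):
--         if tab[x][y]:
--             if minTerms[x] in chk:
--                 count+=1
--     return count
--
-- def getAnalyseMat(minTerms,results):
--     mat = []
--     for _ in range(len(minTerms)):
--         mat.append([])
--     for x in range(len(minTerms)):
--         for y in range(len(results)):
--             mat[x].append(equalsIngoreNull(minTerms[x],results[y]))
--     return mat
--
-- def equalsIngoreNull(a,b):
--     if len(b) != len(a): raise Exception(f"Impossible to compare this 2 terms {a} and {b}")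
--     for i in range(len(a)):
--         if a[i]!=NULL_CHAR and b[i]!=NULL_CHAR:
--             if a[i] != b[i]:
--                 return False
--     return True
-- ===== SOURCE B (Python) =====
-- NULL_CHAR = '-'
--
-- def resultSelector(minTerms, results):
--     # Alternative algorithm: precompute the match matrix once, then keep a per-result
--     # count of already-checked matching minterm rows, updated incrementally when rows
--     # become checked, instead of rescanning the matrix for every candidate result.
--     def matches(a, b):
--         return len(a) == len(b) and all(
--             c == NULL_CHAR or d == NULL_CHAR or c == d for c, d in zip(a, b))
--     mat = [[matches(t, r) for r in results] for t in minTerms]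
--     count = [0] * len(results)
--     checked = set()
--     res = []
--     for x in range(len(minTerms)):
--         t = minTerms[x]
--         if t in checked:
--             continue
--         row = mat[x]
--         best = None
--         bestCount = len(minTerms)
--         for y in range(len(results)):
--             if row[y] and count[y] < bestCount:
--                 bestCount = count[y]
--                 best = y
--         newRows = [z for z in range(len(minTerms))
--                    if minTerms[z] not in checked and mat[z][best]]
--         checked.update(minTerms[z] for z in newRows)
--         count = [count[y] + sum(1 for z in newRows if mat[z][y])
--                  for y in range(len(results))]
--         res.append(results[best])
--     return res
-- ===== Notes on version B (the rewrite author's own statement) =====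
-- stated objective: alternative
-- what changed: B keeps a per-result count of already-checked matching minterm rows and updates it incrementally when terms become checked, so A's inner getRepeted rescan of the whole match matrix for every candidate result is replaced by a constant-time count lookup.
import Mathlib
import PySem

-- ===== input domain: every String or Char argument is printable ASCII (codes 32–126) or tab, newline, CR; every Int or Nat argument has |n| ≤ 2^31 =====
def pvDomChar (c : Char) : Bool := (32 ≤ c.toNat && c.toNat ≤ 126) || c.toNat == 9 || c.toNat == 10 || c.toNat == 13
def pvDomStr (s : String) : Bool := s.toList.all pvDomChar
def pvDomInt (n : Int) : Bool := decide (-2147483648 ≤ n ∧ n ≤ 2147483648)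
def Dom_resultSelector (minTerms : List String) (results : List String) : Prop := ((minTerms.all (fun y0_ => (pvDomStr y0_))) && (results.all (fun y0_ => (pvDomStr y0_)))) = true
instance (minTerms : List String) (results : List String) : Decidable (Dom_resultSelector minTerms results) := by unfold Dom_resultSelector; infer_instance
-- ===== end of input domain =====

-- B replaces A's per-candidate rescans of the match matrix (getRepeted) by per-result
-- overlap counts that are updated incrementally whenever terms become checked
-- (objective: alternative algorithm, same return value).

-- ===== PORT A =====
-- equalsIngoreNull: Python raises on unequal lengths (excluded by Pre_); on equal
-- lengths this Bool is exact.
def eqIgnoreNull (a b : String) : Bool :=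
  (a.toList.length == b.toList.length) &&
    (a.toList.zip b.toList).all (fun p => p.1 == '-' || p.2 == '-' || p.1 == p.2)

def getAnalyseMat (minTerms results : List String) : List (List Bool) :=
  minTerms.map (fun t => results.map (fun r => eqIgnoreNull t r))

def getRepeted (tab : List (List Bool)) (minTerms : List String) (y : Nat)
    (chk : List String) : Int :=
  (List.range tab.length).foldl
    (fun count x =>
      if (tab.getD x []).getD y false then
        (if chk.contains (minTerms.getD x "") then count + 1 else count)
      else count) 0

-- the inner 'for y in range(len(anTab[x]))' loop of A: (repeted, minPos)
def selA (anTab : List (List Bool)) (minTerms : List String) (chk : List String)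
    (row : List Bool) : Int × Option Nat :=
  (List.range row.length).foldl
    (fun (rm : Int × Option Nat) y =>
      if row.getD y false then
        let tr := getRepeted anTab minTerms y chk
        if rm.1 > tr then (tr, some y) else rm
      else rm) ((minTerms.length : Int), none)

-- the tail of A's loop body: index with minPos, extend checked and res
def finishA (minTerms results : List String) (st : List String × List String)
    (posQ : Option Nat) : List String × List String :=
  match posQ with
  | none => st   -- Python raises TypeError (results[None]) here; excluded by Pre_
  | some pos =>
    let r := results.getD pos ""
    (st.1 ++ [r], st.2 ++ minTerms.filter (fun term => eqIgnoreNull r term))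

def stepA (anTab : List (List Bool)) (minTerms results : List String)
    (st : List String × List String) (x : Nat) : List String × List String :=
  let t := minTerms.getD x ""
  if st.2.contains t then st
  else finishA minTerms results st (selA anTab minTerms st.2 (anTab.getD x [])).2

def resultSelector (minTerms : List String) (results : List String) : List String :=
  let anTab := getAnalyseMat minTerms results
  ((List.range anTab.length).foldl (stepA anTab minTerms results) ([], [])).1

-- ===== PORT B =====
def matchRows (minTerms results : List String) : List (List Bool) :=
  minTerms.map (fun t => results.map (fun r => eqIgnoreNull t r))

-- B's inner selection loop: reads the maintained counts instead of calling getRepeted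
def selB (results : List String) (count : List Int) (mtLen : Nat)
    (row : List Bool) : Int × Option Nat :=
  (List.range results.length).foldl
    (fun (bb : Int × Option Nat) y =>
      if row.getD y false && decide (count.getD y 0 < bb.1) then
        (count.getD y 0, some y)
      else bb) ((mtLen : Int), none)

-- B's loop tail: record newly checked rows and bump the affected counts
def finishB (mat : List (List Bool)) (minTerms results : List String)
    (st : List String × PySem.Set String × List Int) (posQ : Option Nat) :
    List String × PySem.Set String × List Int :=
  match posQ with
  | none => st   -- Python raises TypeError (results[None]) here; excluded by Pre_
  | some best =>
    let newRows := (List.range minTerms.length).filter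
      (fun z => !PySem.Set.contains st.2.1 (minTerms.getD z "") &&
                (mat.getD z []).getD best false)
    (st.1 ++ [results.getD best ""],
     PySem.Set.update st.2.1 (newRows.map (fun z => minTerms.getD z "")),
     (List.range results.length).map
       (fun y => st.2.2.getD y 0 +
         (newRows.countP (fun z => (mat.getD z []).getD y false) : Int)))

def stepB (mat : List (List Bool)) (minTerms results : List String)
    (st : List String × PySem.Set String × List Int) (x : Nat) :
    List String × PySem.Set String × List Int :=
  let t := minTerms.getD x ""
  if PySem.Set.contains st.2.1 t then st
  else finishB mat minTerms results st (selB results st.2.2 minTerms.length (mat.getD x [])).2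

def resultSelector_alt (minTerms : List String) (results : List String) : List String :=
  let mat := matchRows minTerms results
  ((List.range minTerms.length).foldl (stepB mat minTerms results)
    ([], PySem.Set.empty, List.replicate results.length (0 : Int))).1

-- ===== PRECONDITION & SPEC =====
-- Pre_ excludes exactly the inputs on which Python A raises: a minterm/result length
-- mismatch (Exception in equalsIngoreNull) and a minterm matching no result
-- (results[None] → TypeError). It admits every input on which A returns.
def Pre_resultSelector (minTerms : List String) (results : List String) : Prop :=
  (∀ t ∈ minTerms, ∀ r ∈ results, t.toList.length = r.toList.length) ∧
  (∀ t ∈ minTerms, ∃ r ∈ results, eqIgnoreNull t r = true)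

instance (minTerms : List String) (results : List String) :
    Decidable (Pre_resultSelector minTerms results) := by
  unfold Pre_resultSelector; infer_instance

def pvWitness_resultSelector : List String × List String := (["00", "01", "11"], ["0-", "11"])

def Spec_resultSelector (minTerms : List String) (results : List String) (out : List String) : Prop := out = resultSelector_alt minTerms results
instance (minTerms : List String) (results : List String) (out : List String) : Decidable (Spec_resultSelector minTerms results out) := by unfold Spec_resultSelector; infer_instance

-- ===== CLAIM (what is proved, stated in full; the proofs are below) =====
def Claim_equal_resultSelector : Prop := ∀ (minTerms : List String) (results : List String), Dom_resultSelector minTerms results → Pre_resultSelector minTerms results → Spec_resultSelector minTerms results (resultSelector minTerms results)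

-- ===== LEMMAS AND PROOFS =====

-- the row of matches of one term against all results
def rowFn (results : List String) (t : String) : List Bool :=
  results.map (fun r => eqIgnoreNull t r)

theorem matEq : getAnalyseMat = matchRows := rfl

theorem zip_all_symm : ∀ (as bs : List Char),
    ((as.zip bs).all (fun p => p.1 == '-' || p.2 == '-' || p.1 == p.2)) =
    ((bs.zip as).all (fun p => p.1 == '-' || p.2 == '-' || p.1 == p.2)) := by
  intro as
  induction as with
  | nil => intro bs; cases bs <;> simp
  | cons a as ih =>
    intro bs
    cases bs with
    | nil => simp
    | cons b bs =>
      simp only [List.zip_cons_cons, List.all_cons, ih bs]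
      congr 1
      rw [show (a == b) = (b == a) from BEq.comm]
      cases a == '-' <;> cases b == '-' <;> simp

theorem eqIgnoreNull_symm (a b : String) : eqIgnoreNull a b = eqIgnoreNull b a := by
  unfold eqIgnoreNull
  rw [zip_all_symm]
  congr 1
  by_cases h : a.toList.length = b.toList.length <;> simp_all
  omega

theorem countP_split {α : Type} (l : List α) (p q : α → Bool) :
    l.countP p = l.countP (fun a => p a && q a) + l.countP (fun a => p a && !q a) := by
  induction l with
  | nil => simp
  | cons a l ih =>
    simp only [List.countP_cons, ih]
    by_cases hp : p a <;> by_cases hq : q a <;> simp [hp, hq] <;> omega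

theorem getD_mat (minTerms results : List String) {x : Nat} (hx : x < minTerms.length) :
    (matchRows minTerms results).getD x [] = rowFn results (minTerms.getD x "") := by
  simp [matchRows, rowFn, List.getD_eq_getElem?_getD, List.getElem?_map,
    List.getElem?_eq_getElem hx]

theorem getD_rowFn (results : List String) (t : String) {y : Nat} (hy : y < results.length) :
    (rowFn results t).getD y false = eqIgnoreNull t (results.getD y "") := by
  simp [rowFn, List.getD_eq_getElem?_getD, List.getElem?_map, List.getElem?_eq_getElem hy]

theorem getD_str (l : List String) {z : Nat} (hz : z < l.length) : l.getD z "" = l[z] := by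
  simp [List.getD_eq_getElem?_getD, List.getElem?_eq_getElem hz]

theorem getRepeted_eq_countP (tab : List (List Bool)) (minTerms : List String)
    (y : Nat) (chk : List String) :
    getRepeted tab minTerms y chk =
      ((List.range tab.length).countP
        (fun x => (tab.getD x []).getD y false && chk.contains (minTerms.getD x "")) : Int) := by
  unfold getRepeted
  rw [show (fun (count : Int) x =>
      if (tab.getD x []).getD y false then
        (if chk.contains (minTerms.getD x "") then count + 1 else count)
      else count) = (fun (count : Int) x =>
      if ((tab.getD x []).getD y false && chk.contains (minTerms.getD x "")) = true
      then count + 1 else count) from by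
    funext c x
    cases h1 : (tab.getD x []).getD y false <;>
      cases h2 : chk.contains (minTerms.getD x "") <;> simp]
  rw [PySem.List.foldl_count_if]
  simp

theorem sel_mem (l : List Nat) (cond : Int × Option Nat → Nat → Bool)
    (g : Nat → Int) (init : Int × Option Nat) {p : Nat}
    (h : (l.foldl (fun bb y => if cond bb y then (g y, some y) else bb) init).2 = some p) :
    init.2 = some p ∨ p ∈ l := by
  induction l generalizing init with
  | nil => exact Or.inl h
  | cons a l ih =>
    simp only [List.foldl_cons] at h
    by_cases hc : cond init a
    · rw [if_pos hc] at h
      rcases ih _ h with h' | h'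
      · simp at h'
        simp [h']
      · simp [h']
    · rw [if_neg hc] at h
      rcases ih _ h with h' | h'
      · exact Or.inl h'
      · simp [h']

-- the invariant tying A's loop state to B's loop state
def InvAB (minTerms results : List String) (sA : List String × List String)
    (sB : List String × PySem.Set String × List Int) : Prop :=
  sA.1 = sB.1 ∧ (∀ s : String, s ∈ sA.2 ↔ s ∈ sB.2.1) ∧
  (∀ y : Nat, y < results.length →
    sB.2.2.getD y 0 = getRepeted (getAnalyseMat minTerms results) minTerms y sA.2)

theorem step_inv (minTerms results : List String) {x : Nat} (hx : x < minTerms.length)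
    (sA : List String × List String) (sB : List String × PySem.Set String × List Int)
    (h : InvAB minTerms results sA sB) :
    InvAB minTerms results (stepA (getAnalyseMat minTerms results) minTerms results sA x)
      (stepB (matchRows minTerms results) minTerms results sB x) := by
  obtain ⟨h1, h2, h3⟩ := h
  have hM : (getAnalyseMat minTerms results).length = minTerms.length := by
    simp [getAnalyseMat]
  have hentry : ∀ z, z < minTerms.length → ∀ y, y < results.length →
      ((matchRows minTerms results).getD z []).getD y false =
        eqIgnoreNull (minTerms.getD z "") (results.getD y "") := by
    intro z hz y hy
    rw [getD_mat minTerms results hz, getD_rowFn _ _ hy]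
  have hcont : sA.2.contains (minTerms.getD x "") =
      PySem.Set.contains sB.2.1 (minTerms.getD x "") := by
    rw [Bool.eq_iff_iff, List.contains_iff_mem, PySem.Set.contains_iff]
    exact h2 _
  rw [matEq]
  show InvAB minTerms results
    (if sA.2.contains (minTerms.getD x "") = true then sA
     else finishA minTerms results sA
       (selA (matchRows minTerms results) minTerms sA.2 ((matchRows minTerms results).getD x [])).2)
    (if PySem.Set.contains sB.2.1 (minTerms.getD x "") = true then sB
     else finishB (matchRows minTerms results) minTerms results sB
       (selB results sB.2.2 minTerms.length ((matchRows minTerms results).getD x [])).2)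
  rw [hcont]
  by_cases hch : PySem.Set.contains sB.2.1 (minTerms.getD x "") = true
  · rw [if_pos hch, if_pos hch]
    exact ⟨h1, h2, h3⟩
  · rw [if_neg hch, if_neg hch]
    have hsel : selA (matchRows minTerms results) minTerms sA.2
        ((matchRows minTerms results).getD x []) =
        selB results sB.2.2 minTerms.length ((matchRows minTerms results).getD x []) := by
      unfold selA selB
      rw [getD_mat minTerms results hx, show (rowFn results (minTerms.getD x "")).length
        = results.length from by simp [rowFn]]
      apply PySem.List.foldl_congr_mem
      intro acc y hy
      have hy' : y < results.length := List.mem_range.mp hy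
      have htr : getRepeted (matchRows minTerms results) minTerms y sA.2 =
          sB.2.2.getD y 0 := by rw [← matEq, ← h3 y hy']
      rw [getD_rowFn _ _ hy']
      by_cases hcy : eqIgnoreNull (minTerms.getD x "") (results.getD y "") = true
      · rw [if_pos hcy]
        show (if acc.1 > getRepeted (matchRows minTerms results) minTerms y sA.2 then
            (getRepeted (matchRows minTerms results) minTerms y sA.2, some y) else acc) = _
        rw [htr]
        by_cases hlt : sB.2.2.getD y 0 < acc.1
        · rw [if_pos (show acc.1 > sB.2.2.getD y 0 from hlt),
              if_pos (show (eqIgnoreNull (minTerms.getD x "") (results.getD y "") &&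
                decide (sB.2.2.getD y 0 < acc.1)) = true by
                  rw [hcy, decide_eq_true hlt]; rfl)]
        · rw [if_neg (show ¬ acc.1 > sB.2.2.getD y 0 from hlt),
              if_neg (show ¬ (eqIgnoreNull (minTerms.getD x "") (results.getD y "") &&
                decide (sB.2.2.getD y 0 < acc.1)) = true by
                  rw [hcy, decide_eq_false hlt]; simp)]
      · rw [if_neg hcy, if_neg (show ¬ (eqIgnoreNull (minTerms.getD x "") (results.getD y "") &&
          decide (sB.2.2.getD y 0 < acc.1)) = true from
            fun hand => hcy ((Bool.and_eq_true _ _).mp hand).1)]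
    rw [hsel]
    cases hres : (selB results sB.2.2 minTerms.length
        ((matchRows minTerms results).getD x [])).2 with
    | none => exact ⟨h1, h2, h3⟩
    | some pos =>
      have hpos : pos < results.length := by
        unfold selB at hres
        rcases sel_mem (List.range results.length)
          (fun bb y => ((matchRows minTerms results).getD x []).getD y false &&
            decide (sB.2.2.getD y 0 < bb.1))
          (fun y => sB.2.2.getD y 0) ((minTerms.length : Int), none) hres with h' | h'
        · exact absurd h' (by simp)
        · exact List.mem_range.mp h'
      show InvAB minTerms results
        (sA.1 ++ [results.getD pos ""],
         sA.2 ++ List.filter (fun term => eqIgnoreNull (results.getD pos "") term) minTerms)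
        (sB.1 ++ [results.getD pos ""],
         PySem.Set.update sB.2.1
           (((List.range minTerms.length).filter
             (fun z => !PySem.Set.contains sB.2.1 (minTerms.getD z "") &&
               ((matchRows minTerms results).getD z []).getD pos false)).map
             (fun z => minTerms.getD z "")),
         (List.range results.length).map
           (fun y => sB.2.2.getD y 0 +
             ((((List.range minTerms.length).filter
               (fun z => !PySem.Set.contains sB.2.1 (minTerms.getD z "") &&
                 ((matchRows minTerms results).getD z []).getD pos false)).countP
               (fun z => ((matchRows minTerms results).getD z []).getD y false)) : Int)))
      -- Bool bridge: the filter predicate holds at z iff z's term is unchecked and matches r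
      have hpred : ∀ z, z < minTerms.length →
          ((!PySem.Set.contains sB.2.1 (minTerms.getD z "") &&
            ((matchRows minTerms results).getD z []).getD pos false) = true ↔
          (¬ (minTerms.getD z "") ∈ sA.2 ∧
            eqIgnoreNull (results.getD pos "") (minTerms.getD z "") = true)) := by
        intro z hz
        rw [hentry z hz pos hpos,
          eqIgnoreNull_symm (minTerms.getD z "") (results.getD pos "")]
        simp only [Bool.and_eq_true, Bool.not_eq_true']
        constructor
        · rintro ⟨hnc, hm⟩
          refine ⟨fun hmem => ?_, hm⟩
          rw [(PySem.Set.contains_iff _ _).mpr ((h2 _).mp hmem)] at hnc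
          exact absurd hnc (by simp)
        · rintro ⟨hnc, hm⟩
          refine ⟨?_, hm⟩
          cases hcb : PySem.Set.contains sB.2.1 (minTerms.getD z "") with
          | false => rfl
          | true => exact absurd ((h2 _).mpr ((PySem.Set.contains_iff _ _).mp hcb)) hnc
      refine ⟨by rw [h1], ?_, ?_⟩
      · -- membership of the two checked collections coincides
        intro s
        simp only [List.mem_append, List.mem_filter, PySem.Set.mem_update, List.mem_map,
          List.mem_range]
        constructor
        · rintro (hs | ⟨hs, hm⟩)
          · exact Or.inl ((h2 s).mp hs)
          · by_cases hsB : s ∈ sB.2.1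
            · exact Or.inl hsB
            · refine Or.inr ?_
              rcases List.mem_iff_getElem.mp hs with ⟨z, hz, hzs⟩
              have hzd : minTerms.getD z "" = s := by rw [getD_str minTerms hz, hzs]
              refine ⟨z, ⟨hz, ?_⟩, hzd⟩
              rw [hpred z hz, hzd]
              exact ⟨fun hmem => hsB ((h2 s).mp hmem), hm⟩
        · rintro (hs | ⟨z, hzmem, hzs⟩)
          · exact Or.inl ((h2 s).mpr hs)
          · obtain ⟨hz, hzp⟩ := hzmem
            rcases (hpred z hz).mp hzp with ⟨_, hm⟩
            refine Or.inr ⟨?_, by rw [← hzs]; exact hm⟩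
            rw [← hzs, getD_str minTerms hz]
            exact List.getElem_mem hz
      · -- the maintained counts equal A's recomputed getRepeted values
        intro y hy
        rw [PySem.List.getD_map_range _ _ _ _ hy, h3 y hy,
          getRepeted_eq_countP, getRepeted_eq_countP, hM]
        have key : (List.range minTerms.length).countP
            (fun z => ((getAnalyseMat minTerms results).getD z []).getD y false &&
              (sA.2 ++ List.filter (fun term => eqIgnoreNull (results.getD pos "") term)
                minTerms).contains (minTerms.getD z "")) =
            (List.range minTerms.length).countP
              (fun z => ((getAnalyseMat minTerms results).getD z []).getD y false &&
                sA.2.contains (minTerms.getD z "")) +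
            ((List.range minTerms.length).filter
              (fun z => !PySem.Set.contains sB.2.1 (minTerms.getD z "") &&
                ((matchRows minTerms results).getD z []).getD pos false)).countP
              (fun z => ((matchRows minTerms results).getD z []).getD y false) := by
          rw [countP_split (List.range minTerms.length)
            (fun z => ((getAnalyseMat minTerms results).getD z []).getD y false &&
              (sA.2 ++ List.filter (fun term => eqIgnoreNull (results.getD pos "") term)
                minTerms).contains (minTerms.getD z ""))
            (fun z => decide ((minTerms.getD z "") ∈ sA.2))]
          congr 1
          · apply List.countP_congr
            intro z hz
            simp only [Bool.and_eq_true, List.contains_iff_mem, List.mem_append,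
              decide_eq_true_eq]
            constructor
            · rintro ⟨⟨he, _⟩, hc⟩; exact ⟨he, hc⟩
            · rintro ⟨he, hc⟩; exact ⟨⟨he, Or.inl hc⟩, hc⟩
          · rw [List.countP_filter]
            apply List.countP_congr
            intro z hz
            have hz' : z < minTerms.length := List.mem_range.mp hz
            have hzmt : minTerms.getD z "" ∈ minTerms := by
              rw [getD_str minTerms hz']; exact List.getElem_mem hz'
            simp only [Bool.and_eq_true, List.contains_iff_mem, List.mem_append,
              List.mem_filter, Bool.not_eq_true', decide_eq_false_iff_not, hpred z hz']
            constructor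
            · rintro ⟨⟨he, hor⟩, hnc⟩
              rcases hor with hin | ⟨_, hm⟩
              · exact absurd hin hnc
              · exact ⟨he, hnc, hm⟩
            · rintro ⟨he, hnc, hm⟩
              exact ⟨⟨he, Or.inr ⟨hzmt, hm⟩⟩, hnc⟩
        rw [key]
        push_cast
        ring

theorem fold_inv (minTerms results : List String) (l : List Nat)
    (hl : ∀ x ∈ l, x < minTerms.length)
    (sA : List String × List String) (sB : List String × PySem.Set String × List Int)
    (h : InvAB minTerms results sA sB) :
    InvAB minTerms results
      (l.foldl (stepA (getAnalyseMat minTerms results) minTerms results) sA)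
      (l.foldl (stepB (matchRows minTerms results) minTerms results) sB) := by
  induction l generalizing sA sB with
  | nil => exact h
  | cons a l ih =>
    simp only [List.foldl_cons]
    exact ih (fun x hx => hl x (List.mem_cons_of_mem a hx)) _ _
      (step_inv minTerms results (hl a (List.mem_cons_self)) sA sB h)

-- ===== VERDICT (by name: the statement is the Claim_ definition above) =====
theorem resultSelector_spec : Claim_equal_resultSelector := by
  intro minTerms results _ _
  unfold Spec_resultSelector resultSelector resultSelector_alt
  have h0 : InvAB minTerms results ([], [])
      ([], PySem.Set.empty, List.replicate results.length (0 : Int)) := by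
    refine ⟨rfl, by simp [PySem.Set.empty], ?_⟩
    intro y hy
    rw [List.getD_replicate _ hy, getRepeted_eq_countP]
    simp
  have h := fold_inv minTerms results (List.range minTerms.length)
    (fun x hx => List.mem_range.mp hx) _ _ h0
  have hlen : (getAnalyseMat minTerms results).length = minTerms.length := by
    simp [getAnalyseMat]
  show ((List.range (getAnalyseMat minTerms results).length).foldl
      (stepA (getAnalyseMat minTerms results) minTerms results) ([], [])).1 =
    ((List.range minTerms.length).foldl (stepB (matchRows minTerms results) minTerms results)
      ([], PySem.Set.empty, List.replicate results.length (0 : Int))).1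
  rw [hlen]
  exact h.1
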